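-- pv_equiv track=rewrite | github.com/bearing/python3316 | processing/h5file.py | _check_events
-- ===== SOURCE A (Python) =====
-- def _check_events(hit_stats):  # This is being done explicitly in case someone else needs to modify this
--     num_det = len(hit_stats)
--     evt_lengths = [None] * num_det
--     raw_samples = [None] * num_det
--     maw_samples = [None] * num_det
--
--     for det, stats in enumerate(hit_stats):
--         evt_lengths[det] = stats['event_length']
--         raw_samples[det] = stats['raw_event_length']
--         maw_samples[det] = stats['maw_event_length']
--
--     return (evt_lengths.count(evt_lengths[0]) == num_det) & (raw_samples.count(raw_samples[0]) == num_det) &\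
--            (maw_samples.count(maw_samples[0]) == num_det)
-- ===== SOURCE B (Python) =====
-- def _check_events(hit_stats):
--     first = hit_stats[0]
--     e0, r0, m0 = first['event_length'], first['raw_event_length'], first['maw_event_length']
--     ok = True
--     for s in hit_stats:
--         e, r, m = s['event_length'], s['raw_event_length'], s['maw_event_length']
--         if e != e0 or r != r0 or m != m0:
--             ok = False
--     return ok
-- ===== Notes on version B (the rewrite author's own statement) =====
-- stated objective: simpler
-- what changed: Single comparison pass against the first detector's three reference values with a running flag, instead of building three parallel lists and counting each against its first element.
import Mathlib
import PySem

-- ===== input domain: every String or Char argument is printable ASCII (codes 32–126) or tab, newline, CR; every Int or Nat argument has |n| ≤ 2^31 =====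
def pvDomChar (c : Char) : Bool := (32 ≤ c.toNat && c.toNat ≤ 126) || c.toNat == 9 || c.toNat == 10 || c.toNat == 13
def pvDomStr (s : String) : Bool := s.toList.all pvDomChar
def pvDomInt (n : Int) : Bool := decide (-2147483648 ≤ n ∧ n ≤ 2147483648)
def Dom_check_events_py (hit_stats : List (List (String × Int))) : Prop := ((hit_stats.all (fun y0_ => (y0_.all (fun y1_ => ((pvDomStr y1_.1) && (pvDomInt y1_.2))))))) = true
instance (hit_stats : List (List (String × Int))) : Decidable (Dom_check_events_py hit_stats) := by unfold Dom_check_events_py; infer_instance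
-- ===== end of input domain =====

-- B replaces A's three-lists-then-three-counts structure by one comparison pass against the
-- first detector's reference values (objective: simpler).

-- shared dict accessor: stats['<key>'] — total via getD 0; Pre_ guarantees the key is present
def ceKey (s : List (String × Int)) (k : String) : Int :=
  (PySem.Dict.mk s).getD k 0

-- ===== PORT A =====
def check_events_py (hit_stats : List (List (String × Int))) : Bool :=
  let num_det := hit_stats.length
  -- the enumerate loop filling the three preallocated lists, as one fold over the same state
  let st := hit_stats.foldl
    (fun (acc : List Int × List Int × List Int) stats =>
      (acc.1 ++ [ceKey stats "event_length"],
       acc.2.1 ++ [ceKey stats "raw_event_length"],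
       acc.2.2 ++ [ceKey stats "maw_event_length"]))
    ([], [], [])
  let evt_lengths := st.1
  let raw_samples := st.2.1
  let maw_samples := st.2.2
  decide (PySem.List.count evt_lengths ((PySem.List.pyGet? evt_lengths 0).getD 0) = num_det) &&
  decide (PySem.List.count raw_samples ((PySem.List.pyGet? raw_samples 0).getD 0) = num_det) &&
  decide (PySem.List.count maw_samples ((PySem.List.pyGet? maw_samples 0).getD 0) = num_det)

-- ===== PORT B =====
def check_events_py_alt (hit_stats : List (List (String × Int))) : Bool :=
  match hit_stats with
  | [] => false   -- unreachable: Pre_ requires a first detector (Python raises IndexError here)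
  | first :: _ =>
    let e0 := ceKey first "event_length"
    let r0 := ceKey first "raw_event_length"
    let m0 := ceKey first "maw_event_length"
    hit_stats.foldl
      (fun ok s =>
        if ceKey s "event_length" ≠ e0 ∨ ceKey s "raw_event_length" ≠ r0 ∨
           ceKey s "maw_event_length" ≠ m0 then false else ok)
      true

-- ===== PRECONDITION & SPEC =====
-- Pre_ excludes exactly the inputs on which the Python A raises: the empty list (IndexError)
-- and any detector dict missing one of the three keys (KeyError).
def Pre_check_events_py (hit_stats : List (List (String × Int))) : Prop :=
  hit_stats ≠ [] ∧ ∀ s ∈ hit_stats,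
    (PySem.Dict.mk s).contains "event_length" = true ∧
    (PySem.Dict.mk s).contains "raw_event_length" = true ∧
    (PySem.Dict.mk s).contains "maw_event_length" = true
instance (hit_stats : List (List (String × Int))) : Decidable (Pre_check_events_py hit_stats) := by
  unfold Pre_check_events_py; infer_instance

def pvWitness_check_events_py : (List (List (String × Int))) :=
  [[("event_length", 4), ("raw_event_length", 8), ("maw_event_length", 2)],
   [("event_length", 4), ("raw_event_length", 8), ("maw_event_length", 2)]]

def Spec_check_events_py (hit_stats : List (List (String × Int))) (out : Bool) : Prop := out = check_events_py_alt hit_stats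
instance (hit_stats : List (List (String × Int))) (out : Bool) : Decidable (Spec_check_events_py hit_stats out) := by unfold Spec_check_events_py; infer_instance

-- ===== CLAIM (what is proved, stated in full; the proofs are below) =====
def Claim_equal_check_events_py : Prop := ∀ (hit_stats : List (List (String × Int))), Dom_check_events_py hit_stats → Pre_check_events_py hit_stats → Spec_check_events_py hit_stats (check_events_py hit_stats)

-- ===== LEMMAS AND PROOFS =====

-- A's fold builds exactly the three mapped lists
theorem ce_fold_triple (l : List (List (String × Int))) (a b c : List Int) :
    l.foldl
      (fun (acc : List Int × List Int × List Int) stats =>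
        (acc.1 ++ [ceKey stats "event_length"],
         acc.2.1 ++ [ceKey stats "raw_event_length"],
         acc.2.2 ++ [ceKey stats "maw_event_length"]))
      (a, b, c)
    = (a ++ l.map (fun s => ceKey s "event_length"),
       b ++ l.map (fun s => ceKey s "raw_event_length"),
       c ++ l.map (fun s => ceKey s "maw_event_length")) := by
  induction l generalizing a b c with
  | nil => simp
  | cons h t ih => simp [List.foldl_cons, ih]

-- B's flag loop is an all-pass
theorem ce_fold_flag (p : List (String × Int) → Prop) [DecidablePred p]
    (l : List (List (String × Int))) (b : Bool) :
    l.foldl (fun ok s => if p s then false else ok) b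
    = (b && l.all (fun s => decide ¬ p s)) := by
  induction l generalizing b with
  | nil => simp
  | cons h t ih =>
    simp only [List.foldl_cons, List.all_cons, ih]
    by_cases hp : p h <;> simp [hp]

theorem count_head_eq_length (x : Int) (l : List Int) :
    (PySem.List.count (x :: l) ((PySem.List.pyGet? (x :: l) 0).getD 0) = l.length + 1)
    ↔ ∀ y ∈ l, y = x := by
  have hget : (PySem.List.pyGet? (x :: l) 0).getD 0 = x := by
    simp [PySem.List.pyGet?, PySem.List.pyIdx?]
  rw [hget, PySem.List.count_eq, show l.length + 1 = (x :: l).length from rfl,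
    List.count_eq_length]
  simp only [List.mem_cons]
  exact ⟨fun h y hy => (h y (Or.inr hy)).symm,
         fun h b hb => hb.elim (fun e => e.symm) (fun m => (h b m).symm)⟩
theorem count_map_head (f : List (String × Int) → Int)
    (h : List (String × Int)) (t : List (List (String × Int))) :
    (PySem.List.count (f h :: t.map f) ((PySem.List.pyGet? (f h :: t.map f) 0).getD 0)
      = t.length + 1)
    ↔ ∀ s ∈ t, f s = f h := by
  rw [show t.length = (t.map f).length by simp, count_head_eq_length]
  simp

-- ===== VERDICT (by name: the statement is the Claim_ definition above) =====
theorem check_events_py_spec : Claim_equal_check_events_py := by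
  intro hs _hdom hpre
  obtain ⟨hne, -⟩ := hpre
  unfold Spec_check_events_py check_events_py check_events_py_alt
  obtain ⟨h, t⟩ := hs.exists_cons_of_ne_nil hne
  obtain ⟨t, rfl⟩ := t
  simp only [ce_fold_triple, ce_fold_flag, List.nil_append, List.map_cons, List.length_cons]
  rw [Bool.eq_iff_iff]
  simp only [Bool.and_eq_true, decide_eq_true_eq,
    count_map_head (fun s => ceKey s "event_length") h t,
    count_map_head (fun s => ceKey s "raw_event_length") h t,
    count_map_head (fun s => ceKey s "maw_event_length") h t,
    List.all_cons, List.all_eq_true, not_or, not_not, true_and]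
  constructor
  · rintro ⟨⟨he, hr⟩, hm⟩ s hsmem
    exact ⟨he s hsmem, hr s hsmem, hm s hsmem⟩
  · intro hall
    exact ⟨⟨fun s hs => (hall s hs).1, fun s hs => (hall s hs).2.1⟩,
           fun s hs => (hall s hs).2.2⟩
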